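-- pv_equiv track=rewrite | github.com/elgatoafk/password-checker | password_checker.py | has_consecutive_letters
-- ===== SOURCE A (Python) =====
-- def has_consecutive_letters(password) -> bool:
--     """
--     Check if the password contains three or more consecutive letters.
--
--     Args:
--         password (str): The password to check.
--
--     Returns:
--         bool: True if consecutive letters are found, False otherwise.
--     """
--     count = 0
--     for char in password:
--         if char.isalpha():
--             count += 1
--             if count >= 3:
--                 return True
--         else:
--             count = 0
--     return False
-- ===== SOURCE B (Python) =====
-- def has_consecutive_letters(password) -> bool:
--     """Run-based re-implementation: split the string into maximal runs of
--     same 'isalpha' kind (groupby-style), then ask whether some alphabetic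
--     run has length >= 3."""
--     runs = []
--     i, n = 0, len(password)
--     while i < n:
--         k = password[i].isalpha()
--         j = i + 1
--         while j < n and password[j].isalpha() == k:
--             j += 1
--         runs.append((k, j - i))
--         i = j
--     return any(k and m >= 3 for (k, m) in runs)
-- ===== Notes on version B (the rewrite author's own statement) =====
-- stated objective: alternative
-- what changed: Replaced the resettable consecutive-letter counter with a two-pointer scan over maximal runs of equal isalpha kind, testing each alphabetic run's length against 3.
import Mathlib
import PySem

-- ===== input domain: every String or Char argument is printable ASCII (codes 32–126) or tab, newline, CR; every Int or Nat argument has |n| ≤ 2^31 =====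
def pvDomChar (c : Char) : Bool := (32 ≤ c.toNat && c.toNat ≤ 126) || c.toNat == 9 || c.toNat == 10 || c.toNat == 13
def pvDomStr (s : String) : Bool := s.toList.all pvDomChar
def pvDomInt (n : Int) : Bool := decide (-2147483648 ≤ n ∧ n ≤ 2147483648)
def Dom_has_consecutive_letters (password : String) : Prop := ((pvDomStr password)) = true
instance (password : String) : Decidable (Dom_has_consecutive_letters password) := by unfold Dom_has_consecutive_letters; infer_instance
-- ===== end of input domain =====

-- B re-implements A by splitting the string into maximal runs of equal isalpha-kind
-- (groupby-style) and testing run lengths, instead of A's resettable counter (objective: alternative).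

-- ===== PORT A =====
-- the for-loop with the resettable counter and the early 'return True'
def pvLoopA : List Char → Nat → Bool
  | [], _ => false
  | c :: cs, count =>
    if PySem.Chars.isalpha c then
      if count + 1 ≥ 3 then true else pvLoopA cs (count + 1)
    else pvLoopA cs 0

def has_consecutive_letters (password : String) : Bool :=
  pvLoopA password.toList 0

-- ===== PORT B =====
-- inner while: consume chars of the same isalpha-kind k, counting them (returns (m, rest))
def pvRunB (k : Bool) (m : Nat) : List Char → Nat × List Char
  | [] => (m, [])
  | c :: cs => if PySem.Chars.isalpha c == k then pvRunB k (m + 1) cs else (m, c :: cs)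

theorem pvRunB_len_le (k : Bool) (m : Nat) (l : List Char) : (pvRunB k m l).2.length ≤ l.length := by
  induction l generalizing m with
  | nil => simp [pvRunB]
  | cons c cs ih =>
    simp only [pvRunB]
    split
    · exact Nat.le_trans (ih _) (Nat.le_succ _)
    · exact Nat.le_refl _

-- outer while: build the list of (kind, run length) pairs
def pvRunsB : List Char → List (Bool × Nat)
  | [] => []
  | c :: cs =>
    let k := PySem.Chars.isalpha c
    let r := pvRunB k 1 cs
    (k, r.1) :: pvRunsB r.2
termination_by l => l.length
decreasing_by
  exact Nat.lt_succ_of_le (pvRunB_len_le _ _ _)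

def has_consecutive_letters_alt (password : String) : Bool :=
  (pvRunsB password.toList).any (fun p => p.1 && decide (p.2 ≥ 3))

-- ===== PRECONDITION & SPEC =====
def Spec_has_consecutive_letters (password : String) (out : Bool) : Prop := out = has_consecutive_letters_alt password
instance (password : String) (out : Bool) : Decidable (Spec_has_consecutive_letters password out) := by unfold Spec_has_consecutive_letters; infer_instance

-- ===== CLAIM (what is proved, stated in full; the proofs are below) =====
def Claim_equal_has_consecutive_letters : Prop := ∀ (password : String), Dom_has_consecutive_letters password → Spec_has_consecutive_letters password (has_consecutive_letters password)

-- ===== LEMMAS AND PROOFS =====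

theorem pvRunB_spec (k : Bool) (l : List Char) (m : Nat) :
    pvRunB k m l = (m + (l.takeWhile (fun x => PySem.Chars.isalpha x == k)).length,
                    l.dropWhile (fun x => PySem.Chars.isalpha x == k)) := by
  induction l generalizing m with
  | nil => simp [pvRunB]
  | cons c cs ih =>
    by_cases h : PySem.Chars.isalpha c == k
    · simp [pvRunB, h, ih]
      omega
    · simp [pvRunB, h]

-- A's loop over an all-alphabetic prefix, starting below the threshold
theorem pvLoopA_alpha (run : List Char) (rest : List Char) (count : Nat)
    (hc : count < 3) (hall : ∀ x ∈ run, PySem.Chars.isalpha x = true) :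
    pvLoopA (run ++ rest) count =
      if count + run.length ≥ 3 then true else pvLoopA rest (count + run.length) := by
  induction run generalizing count with
  | nil => simp; omega
  | cons a run' ih =>
    have ha : PySem.Chars.isalpha a = true := hall a (by simp)
    simp only [List.cons_append, pvLoopA, ha, if_true]
    by_cases h3 : count + 1 ≥ 3
    · rw [if_pos h3, if_pos (by simp; omega)]
    · rw [if_neg h3, ih (count + 1) (by omega) (fun x hx => hall x (List.mem_cons_of_mem _ hx))]
      have he : count + 1 + run'.length = count + (a :: run').length := by simp; omega
      rw [he]

-- A's loop resets over an all-non-alphabetic prefix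
theorem pvLoopA_nonalpha (pre : List Char) (rest : List Char)
    (hall : ∀ x ∈ pre, PySem.Chars.isalpha x = false) :
    pvLoopA (pre ++ rest) 0 = pvLoopA rest 0 := by
  induction pre with
  | nil => rfl
  | cons a pre' ih =>
    have ha : PySem.Chars.isalpha a = false := hall a (by simp)
    simp only [List.cons_append, pvLoopA, ha, if_false, Bool.false_eq_true]
    exact ih (fun x hx => hall x (List.mem_cons_of_mem _ hx))

-- the head of a dropWhile result fails the predicate
theorem pv_dropWhile_head {p : Char → Bool} :
    ∀ (l : List Char) (d : Char) (ds : List Char), l.dropWhile p = d :: ds → p d = false := by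
  intro l
  induction l with
  | nil => intro d ds h; simp [List.dropWhile] at h
  | cons c cs ih =>
    intro d ds h
    rw [List.dropWhile_cons] at h
    by_cases hp : p c
    · rw [if_pos hp] at h; exact ih d ds h
    · rw [if_neg hp] at h
      cases h
      simpa using hp

theorem pv_main : ∀ (n : Nat) (l : List Char), l.length ≤ n →
    pvLoopA l 0 = (pvRunsB l).any (fun p => p.1 && decide (p.2 ≥ 3)) := by
  intro n
  induction n with
  | zero =>
    intro l hl
    have : l = [] := List.length_eq_zero_iff.mp (Nat.le_zero.mp hl)
    subst this; simp [pvLoopA, pvRunsB]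
  | succ n ih =>
    intro l hl
    cases l with
    | nil => simp [pvLoopA, pvRunsB]
    | cons c cs =>
      have hcs : cs.length ≤ n := by simpa using hl
      rw [pvRunsB]
      simp only [pvRunB_spec]
      set k := PySem.Chars.isalpha c with hkdef
      set take := cs.takeWhile (fun x => PySem.Chars.isalpha x == k) with htake
      set dropd := cs.dropWhile (fun x => PySem.Chars.isalpha x == k) with hdrop
      have hsplit : take ++ dropd = cs := by
        rw [htake, hdrop]; exact List.takeWhile_append_dropWhile
      have hdlen : dropd.length ≤ n := by
        have h1 : dropd.length ≤ cs.length := by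
          have := pvRunB_len_le k 1 cs
          rw [pvRunB_spec] at this
          simpa [← hdrop] using this
        omega
      have hih := ih dropd hdlen
      by_cases hk : PySem.Chars.isalpha c
      · -- alphabetic run
        have hk' : k = true := by rw [hkdef, hk]
        have hallt : ∀ x ∈ take, PySem.Chars.isalpha x = true := by
          intro x hx
          have := List.mem_takeWhile_imp hx
          rw [hk'] at this
          simpa using this
        have hL : pvLoopA (c :: cs) 0 = pvLoopA cs 1 := by
          simp [pvLoopA, hk]
        rw [hL, ← hsplit, pvLoopA_alpha take dropd 1 (by omega) hallt]
        by_cases h3 : 1 + take.length ≥ 3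
        · rw [if_pos h3]
          simp [hk', h3]
        · rw [if_neg h3]
          have hrhs : ((k, 1 + take.length) :: pvRunsB dropd).any (fun p => p.1 && decide (p.2 ≥ 3))
              = (pvRunsB dropd).any (fun p => p.1 && decide (p.2 ≥ 3)) := by
            simp [h3]
          rw [hrhs]
          cases hd : dropd with
          | nil => simp [hd] at hih ⊢; simpa [hd] using hih
          | cons d ds =>
            have hdna : PySem.Chars.isalpha d = false := by
              have := pv_dropWhile_head cs d ds (by rw [← hdrop, hd])
              rw [hk'] at this
              simpa using this
            have e1 : pvLoopA (d :: ds) (1 + take.length) = pvLoopA ds 0 := by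
              simp [pvLoopA, hdna]
            have e2 : pvLoopA (d :: ds) 0 = pvLoopA ds 0 := by
              simp [pvLoopA, hdna]
            rw [hd] at hih
            rw [e1, ← e2, hih]
      · -- non-alphabetic run: A resets, B's run is skipped by any
        have hk' : k = false := by rw [hkdef]; simpa using hk
        have hallf : ∀ x ∈ take, PySem.Chars.isalpha x = false := by
          intro x hx
          have := List.mem_takeWhile_imp hx
          rw [hk'] at this
          simpa using this
        have hL : pvLoopA (c :: cs) 0 = pvLoopA cs 0 := by
          simp [pvLoopA, hk]
        rw [hL, ← hsplit, pvLoopA_nonalpha take dropd hallf, hih]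
        simp [hk']

-- ===== VERDICT (by name: the statement is the Claim_ definition above) =====
theorem has_consecutive_letters_spec : Claim_equal_has_consecutive_letters := by
  intro password _
  unfold Spec_has_consecutive_letters has_consecutive_letters has_consecutive_letters_alt
  exact pv_main password.toList.length password.toList (Nat.le_refl _)
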